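-- pv_equiv track=rewrite | github.com/SaidAbbos96/pySmallTasks | sariqDevTasks/micro_games.py | calc_dice_scores
-- ===== SOURCE A (Python) =====
-- def calc_dice_scores(dices: list):
--     res_sum = 0
--     for dice in dices:
--         if dice[0] != dice[1]:
--             res_sum += sum(dice)
--         else:
--             res_sum = 0
--             break
--
--     return res_sum
-- ===== SOURCE B (Python) =====
-- def calc_dice_scores(dices: list):
--     if any(d[0] == d[1] for d in dices):
--         return 0
--     return sum(sum(d) for d in dices)
-- ===== Notes on version B (the rewrite author's own statement) =====
-- stated objective: idiomatic
-- what changed: Replaces the single early-breaking accumulator loop with a short-circuiting any() doubles guard followed by a comprehension sum.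
import Mathlib
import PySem

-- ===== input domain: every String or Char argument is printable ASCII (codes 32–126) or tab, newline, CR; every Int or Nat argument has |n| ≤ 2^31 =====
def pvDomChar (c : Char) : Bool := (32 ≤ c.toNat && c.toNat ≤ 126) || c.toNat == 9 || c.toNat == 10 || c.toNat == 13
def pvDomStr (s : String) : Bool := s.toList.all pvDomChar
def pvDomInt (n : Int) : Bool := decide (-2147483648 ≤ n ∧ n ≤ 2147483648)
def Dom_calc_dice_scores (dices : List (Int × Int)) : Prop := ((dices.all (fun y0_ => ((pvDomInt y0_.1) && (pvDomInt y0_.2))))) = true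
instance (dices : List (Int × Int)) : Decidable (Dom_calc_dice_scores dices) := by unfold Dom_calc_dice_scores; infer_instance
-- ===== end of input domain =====

-- B replaces A's single early-breaking accumulator loop with an any() doubles guard plus a comprehension sum (idiomatic; same O(n) cost).
-- ===== PORT A =====
-- literal port of A: fold with early break (break returns 0 regardless of the accumulator)
def calcDiceLoop (acc : Int) : List (Int × Int) → Int
  | [] => acc
  | d :: rest => if d.1 ≠ d.2 then calcDiceLoop (acc + (d.1 + d.2)) rest else 0

def calc_dice_scores (dices : List (Int × Int)) : Int := calcDiceLoop 0 dices

-- ===== PORT B =====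
-- port of B: any() doubles guard, then a comprehension sum
def calc_dice_scores_alt (dices : List (Int × Int)) : Int :=
  if dices.any (fun d => d.1 == d.2) then 0
  else (dices.map (fun d => d.1 + d.2)).sum

-- ===== PRECONDITION & SPEC =====
def Spec_calc_dice_scores (dices : List (Int × Int)) (out : Int) : Prop := out = calc_dice_scores_alt dices
instance (dices : List (Int × Int)) (out : Int) : Decidable (Spec_calc_dice_scores dices out) := by unfold Spec_calc_dice_scores; infer_instance

-- ===== CLAIM (what is proved, stated in full; the proofs are below) =====
def Claim_equal_calc_dice_scores : Prop := ∀ (dices : List (Int × Int)), Dom_calc_dice_scores dices → Spec_calc_dice_scores dices (calc_dice_scores dices)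

-- ===== LEMMAS AND PROOFS =====

-- ===== VERDICT (by name: the statement is the Claim_ definition above) =====
lemma calcDiceLoop_eq (dices : List (Int × Int)) (acc : Int) :
    calcDiceLoop acc dices =
      (if dices.any (fun d => d.1 == d.2) then 0
       else acc + (dices.map (fun d => d.1 + d.2)).sum) := by
  induction dices generalizing acc with
  | nil => simp [calcDiceLoop]
  | cons d rest ih =>
    by_cases h : d.1 = d.2
    · simp [calcDiceLoop, h]
    · simp [calcDiceLoop, h, ih]
      by_cases hr : (rest.any fun d => d.1 == d.2) = true <;> simp [hr, h] <;> ring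

-- ===== VERDICT (by name: the statement is the Claim_ definition above) =====
theorem calc_dice_scores_spec : Claim_equal_calc_dice_scores := by
  intro dices _
  unfold Spec_calc_dice_scores calc_dice_scores calc_dice_scores_alt
  simp [calcDiceLoop_eq]
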